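-- pv_equiv track=rewrite | github.com/heranoffic/Calculate-the-minimum-coprime-number | 计算最小互质数.py | fct1
-- ===== SOURCE A (Python) =====
-- def fct1(a):
--  for i in range(2,a):
--      b=a
--      d=i
--      while i!=b:
--          if b>i:
--              b -=i
--          else:
--              i -=b
--      if i==b:
--          if i==1:
--              c=d
--              return c
--              break
-- ===== SOURCE B (Python) =====
-- def fct1(a):
--     # Factorize a once by trial division, then test candidates by divisibility
--     # against its distinct prime factors instead of a gcd per candidate.
--     primes = []
--     n = a
--     d = 2
--     while d * d <= n:
--         if n % d == 0:
--             primes.append(d)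
--             while n % d == 0:
--                 n //= d
--         else:
--             d += 1
--     if n > 1:
--         primes.append(n)
--     for i in range(2, a):
--         if all(i % p for p in primes):
--             return i
--     return None
-- ===== Notes on version B (the rewrite author's own statement) =====
-- stated objective: faster
-- what changed: B factorizes a once by trial division up to sqrt(a) and returns the first i in range(2,a) not divisible by any of a's distinct prime factors, instead of A's subtraction-based gcd computation for every candidate.
import Mathlib
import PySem

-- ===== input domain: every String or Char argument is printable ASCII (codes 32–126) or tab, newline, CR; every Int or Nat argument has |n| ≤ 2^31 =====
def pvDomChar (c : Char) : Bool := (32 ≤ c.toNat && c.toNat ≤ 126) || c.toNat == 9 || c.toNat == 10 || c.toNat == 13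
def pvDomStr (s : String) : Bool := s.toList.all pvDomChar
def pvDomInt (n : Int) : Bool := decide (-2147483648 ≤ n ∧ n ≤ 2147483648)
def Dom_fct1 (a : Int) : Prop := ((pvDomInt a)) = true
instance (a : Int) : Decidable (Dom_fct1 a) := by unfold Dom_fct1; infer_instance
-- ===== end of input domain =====

-- B replaces A's per-candidate subtraction-gcd with one trial-division factorization of a,
-- testing each candidate only against a's distinct prime factors (objective: faster).

-- ===== PORT A =====
-- Python's subtraction loop `while i!=b: if b>i: b-=i else: i-=b`, returning the final (i, b).
-- The `0 < i ∧ 0 < b` conjuncts only make the recursion total; they hold on every call the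
-- port makes (i ≥ 2, b = a ≥ 3 whenever range(2,a) is nonempty), where the loop is exact.
def subgcd (i b : Nat) : Nat × Nat :=
  if _h : i ≠ b ∧ 0 < i ∧ 0 < b then
    if i < b then subgcd i (b - i) else subgcd (i - b) b
  else (i, b)
termination_by i + b
decreasing_by all_goals omega

-- the `for i in range(2,a)` loop of A; i and b=a are positive here, so Nat via toNat is exact
def fct1Go (a : Int) : List Int → Option Int
  | [] => none
  | i :: rest =>
    let b := a
    let d := i
    let r := subgcd i.toNat b.toNat
    let i' : Int := (r.1 : Int)
    let b' : Int := (r.2 : Int)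
    if i' = b' then
      if i' = 1 then some d else fct1Go a rest
    else fct1Go a rest

def fct1 (a : Int) : Option Int := fct1Go a (PySem.List.pyRange 2 a 1)

-- ===== PORT B =====
-- inner `while n % d == 0: n //= d`; the `2 ≤ d ∧ 0 < n` conjuncts only make it total and
-- hold on every call the port makes (d starts at 2; n ≥ 4 under the outer guard)
def divOut (n d : Nat) : Nat :=
  if h : 2 ≤ d ∧ n % d = 0 ∧ 0 < n then divOut (n / d) d else n
termination_by n
decreasing_by exact Nat.div_lt_self h.2.2 h.1

-- outer trial-division loop `while d*d <= n: ...`, returning (collected divisors, final n);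
-- the `2 ≤ d` conjunct is only for termination and holds on every call (d starts at 2)
def trialDiv (n d : Nat) : List Nat × Nat :=
  if h : 2 ≤ d ∧ d * d ≤ n then
    if n % d = 0 then
      let r := trialDiv (divOut n d) d
      (d :: r.1, r.2)
    else trialDiv n (d + 1)
  else ([], n)
termination_by (n, n - d)
decreasing_by
  · have h1 : ∀ m, divOut m d ≤ m := by
      intro m; induction m using Nat.strong_induction_on with
      | _ m ih =>
        rw [divOut]; split
        · rename_i hg; exact (ih _ (Nat.div_lt_self hg.2.2 hg.1)).trans (Nat.div_le_self _ _)
        · exact le_refl m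
    have h2 : 0 < n := by nlinarith [h.1, h.2]
    have h3 : divOut n d < n := by
      rw [divOut, dif_pos ⟨h.1, ‹n % d = 0›, h2⟩]
      exact lt_of_le_of_lt (h1 _) (Nat.div_lt_self h2 h.1)
    exact Prod.Lex.left _ _ h3
  · have : 2 * d ≤ d * d := Nat.mul_le_mul_right d h.1
    exact Prod.Lex.right n (by omega)

-- `n = a; primes from trial division; if n > 1: primes.append(n)` — a.toNat is exact here:
-- for a ≤ 1 Python collects nothing (the loop guard 4 ≤ a and the n > 1 check both fail)
def pfactors (n : Nat) : List Nat :=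
  if 1 < (trialDiv n 2).2 then (trialDiv n 2).1 ++ [(trialDiv n 2).2]
  else (trialDiv n 2).1

-- `for i in range(2,a): if all(i % p for p in primes): return i`
def fct1AltGo (primes : List Nat) : List Int → Option Int
  | [] => none
  | i :: rest =>
    if primes.all (fun p => PySem.Int.mod i (p : Int) != 0) then some i
    else fct1AltGo primes rest

def fct1_alt (a : Int) : Option Int := fct1AltGo (pfactors a.toNat) (PySem.List.pyRange 2 a 1)

-- ===== PRECONDITION & SPEC =====
def Spec_fct1 (a : Int) (out : Option Int) : Prop := out = fct1_alt a
instance (a : Int) (out : Option Int) : Decidable (Spec_fct1 a out) := by unfold Spec_fct1; infer_instance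

-- ===== CLAIM (what is proved, stated in full; the proofs are below) =====
def Claim_equal_fct1 : Prop := ∀ (a : Int), Dom_fct1 a → Spec_fct1 a (fct1 a)

-- ===== LEMMAS AND PROOFS =====

-- A's subtraction loop computes the gcd (twice) on positive inputs
theorem subgcd_eq : ∀ (i b : Nat), 0 < i → 0 < b →
    subgcd i b = (Nat.gcd i b, Nat.gcd i b) := by
  intro i b
  induction i, b using subgcd.induct with
  | case1 i b h hlt ih =>
    intro hi hb
    rw [subgcd, dif_pos h, if_pos hlt, ih hi (by omega),
      Nat.gcd_sub_self_right (by omega : i ≤ b)]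
  | case2 i b h hlt ih =>
    intro hi hb
    rw [subgcd, dif_pos h, if_neg hlt, ih (by omega) hb,
      Nat.gcd_sub_self_left (by omega : b ≤ i)]
  | case3 i b h =>
    intro hi hb
    have hib : i = b := by omega
    subst hib
    rw [subgcd, dif_neg h, Nat.gcd_self]

theorem divOut_dvd (d n : Nat) : divOut n d ∣ n := by
  induction n using divOut.induct (d := d) with
  | case1 x h ih =>
    rw [divOut, dif_pos h]
    exact ih.trans (Nat.div_dvd_of_dvd (Nat.dvd_of_mod_eq_zero h.2.1))
  | case2 x h => rw [divOut, dif_neg h]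

theorem divOut_pos (d : Nat) : ∀ n, 0 < n → 0 < divOut n d := by
  intro n
  induction n using divOut.induct (d := d) with
  | case1 x h ih =>
    intro _
    rw [divOut, dif_pos h]
    exact ih (Nat.div_pos (Nat.le_of_dvd h.2.2 (Nat.dvd_of_mod_eq_zero h.2.1)) (by omega))
  | case2 x h => intro hx; rw [divOut, dif_neg h]; exact hx

-- dividing out the prime d does not change divisibility by any other prime
theorem divOut_prime_dvd_iff (d : Nat) (hd : d.Prime) (q : Nat) (hq : q.Prime)
    (hqd : q ≠ d) : ∀ n, (q ∣ divOut n d ↔ q ∣ n) := by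
  intro n
  induction n using divOut.induct (d := d) with
  | case1 x h ih =>
    rw [divOut, dif_pos h, ih]
    have hdn : d ∣ x := Nat.dvd_of_mod_eq_zero h.2.1
    constructor
    · intro hquot; exact hquot.trans (Nat.div_dvd_of_dvd hdn)
    · intro hqn
      rcases (Nat.Prime.dvd_mul hq).mp (by rwa [Nat.div_mul_cancel hdn] : q ∣ x / d * d) with h' | h'
      · exact h'
      · exact absurd ((Nat.prime_dvd_prime_iff_eq hq hd).mp h') hqd
  | case2 x h => rw [divOut, dif_neg h]

-- trial-division correctness: collected divisors are primes dividing n, the remainder (if > 1)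
-- is a prime dividing n, and every prime divisor of n is collected or is the remainder
theorem trialDiv_spec : ∀ (n d : Nat), 2 ≤ d → 0 < n →
    (∀ p, p.Prime → p < d → ¬ p ∣ n) →
    (∀ q ∈ (trialDiv n d).1, q.Prime ∧ q ∣ n) ∧
    (1 < (trialDiv n d).2 → (trialDiv n d).2.Prime ∧ (trialDiv n d).2 ∣ n) ∧
    (∀ q, q.Prime → q ∣ n → q ∈ (trialDiv n d).1 ∨ q = (trialDiv n d).2) := by
  intro n d
  induction n, d using trialDiv.induct with
  | case1 n d h hmod ih =>
    intro hd hn hinv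
    have hdn : d ∣ n := Nat.dvd_of_mod_eq_zero hmod
    have hdprime : d.Prime := by
      have h1 : d.minFac.Prime := Nat.minFac_prime (by omega)
      have h2 : d.minFac ∣ n := (Nat.minFac_dvd d).trans hdn
      have h3 : ¬ d.minFac < d := fun hlt => hinv _ h1 hlt h2
      have h4 : d.minFac ≤ d := Nat.minFac_le (by omega)
      have h5 : d.minFac = d := by omega
      rwa [← h5]
    have hn' : 0 < divOut n d := divOut_pos d n hn
    have hinv' : ∀ p, p.Prime → p < d → ¬ p ∣ divOut n d := fun p hp hlt hpd =>
      hinv p hp hlt (hpd.trans (divOut_dvd d n))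
    obtain ⟨ih1, ih2, ih3⟩ := ih hd hn' hinv'
    rw [trialDiv, dif_pos h, if_pos hmod]
    refine ⟨?_, ?_, ?_⟩
    · intro q hq'
      rcases List.mem_cons.mp hq' with h' | hq
      · subst h'; exact ⟨hdprime, hdn⟩
      · obtain ⟨hp, hdvd⟩ := ih1 q hq
        exact ⟨hp, hdvd.trans (divOut_dvd d n)⟩
    · intro h2
      obtain ⟨hp, hdvd⟩ := ih2 h2
      exact ⟨hp, hdvd.trans (divOut_dvd d n)⟩
    · intro q hq hqn
      by_cases hqd : q = d
      · exact Or.inl (by simp [hqd])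
      · have hqn' : q ∣ divOut n d := (divOut_prime_dvd_iff d hdprime q hq hqd n).mpr hqn
        rcases ih3 q hq hqn' with h' | h'
        · exact Or.inl (List.mem_cons_of_mem _ h')
        · exact Or.inr h'
  | case2 n d h hmod ih =>
    intro hd hn hinv
    have hinv' : ∀ p, p.Prime → p < d + 1 → ¬ p ∣ n := by
      intro p hp hlt hpd
      rcases Nat.lt_succ_iff_lt_or_eq.mp hlt with h' | h'
      · exact hinv p hp h' hpd
      · subst h'; exact hmod (Nat.eq_zero_of_dvd_of_lt hpd |> fun _ => by
          exact (Nat.mod_eq_zero_of_dvd hpd))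
    obtain ⟨ih1, ih2, ih3⟩ := ih (by omega) hn hinv'
    rw [trialDiv, dif_pos h, if_neg hmod]
    exact ⟨ih1, ih2, ih3⟩
  | case3 n d h =>
    intro hd hn hinv
    rw [trialDiv, dif_neg h]
    have hsq : n < d * d := by
      rcases Nat.lt_or_ge n (d * d) with h' | h'
      · exact h'
      · exact absurd ⟨hd, h'⟩ h
    have hnprime : 1 < n → n.Prime := by
      intro h1
      have hp : n.minFac.Prime := Nat.minFac_prime (by omega)
      have hpd : n.minFac ∣ n := Nat.minFac_dvd n
      have hge : d ≤ n.minFac := by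
        by_contra hlt
        exact hinv _ hp (by omega) hpd
      obtain ⟨m, hm⟩ := hpd
      have hm1 : m = 1 := by
        by_contra hm1
        have hm0 : 0 < m := by
          rcases Nat.eq_zero_or_pos m with h' | h'
          · subst h'; simp at hm; omega
          · exact h'
        have hmp : m.minFac.Prime := Nat.minFac_prime hm1
        have hmdvd : m.minFac ∣ n := (Nat.minFac_dvd m).trans (Dvd.intro_left n.minFac hm.symm)
        have hge2 : d ≤ m.minFac := by
          by_contra hlt
          exact hinv _ hmp (by omega) hmdvd
        have hbig : d * d ≤ n.minFac * m := by
          calc d * d ≤ n.minFac * d := Nat.mul_le_mul_right d hge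
          _ ≤ n.minFac * m.minFac := Nat.mul_le_mul_left _ hge2
          _ ≤ n.minFac * m := Nat.mul_le_mul_left _ (Nat.minFac_le hm0)
        omega
      rw [hm, hm1, Nat.mul_one]
      exact hp
    refine ⟨by simp, fun h1 => ⟨hnprime h1, dvd_refl n⟩, ?_⟩
    intro q hq hqn
    right
    have h1 : 1 < n := by
      rcases Nat.eq_or_lt_of_le hn with h' | h'
      · exfalso; rw [← h'] at hqn; exact hq.ne_one (Nat.eq_one_of_dvd_one hqn)
      · exact h'
    exact (Nat.prime_dvd_prime_iff_eq hq (hnprime h1)).mp hqn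

-- membership in pfactors characterizes the prime divisors
theorem mem_pfactors (n : Nat) (hn : 0 < n) (q : Nat) :
    q ∈ pfactors n ↔ q.Prime ∧ q ∣ n := by
  obtain ⟨h1, h2, h3⟩ := trialDiv_spec n 2 (le_refl 2) hn (fun p hp hlt _ => absurd hlt (by have := hp.two_le; omega))
  unfold pfactors
  constructor
  · intro hq
    split at hq
    · rcases List.mem_append.mp hq with h' | h'
      · exact h1 q h'
      · rw [List.mem_singleton.mp h']
        exact h2 (by assumption)
    · exact h1 q hq
  · rintro ⟨hqp, hqn⟩
    rcases h3 q hqp hqn with h' | h'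
    · split
      · exact List.mem_append_left _ h'
      · exact h'
    · subst h'
      rw [if_pos hqp.one_lt]
      exact List.mem_append_right _ (List.mem_singleton.mpr rfl)

-- coprimality against n is exactly "no element of pfactors n divides i"
theorem coprime_iff_pfactors (i n : Nat) (hn : 0 < n) :
    Nat.gcd i n = 1 ↔ ∀ p ∈ pfactors n, ¬ p ∣ i := by
  constructor
  · intro hg p hp hpi
    obtain ⟨hpp, hpn⟩ := (mem_pfactors n hn p).mp hp
    have hp1 : p ∣ 1 := hg ▸ Nat.dvd_gcd hpi hpn
    exact hpp.ne_one (Nat.eq_one_of_dvd_one hp1)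
  · intro hall
    by_contra hg
    obtain ⟨q, hqp, hqd⟩ := Nat.exists_prime_and_dvd hg
    exact hall q ((mem_pfactors n hn q).mpr ⟨hqp, hqd.trans (Nat.gcd_dvd_right i n)⟩)
      (hqd.trans (Nat.gcd_dvd_left i n))

-- the two candidate loops agree on any list of candidates 2 ≤ i < a
theorem go_eq (a : Int) (l : List Int) (hl : ∀ i ∈ l, 2 ≤ i ∧ i < a) :
    fct1Go a l = fct1AltGo (pfactors a.toNat) l := by
  induction l with
  | nil => rfl
  | cons i rest ih =>
    obtain ⟨hi2, hia⟩ := hl i (List.mem_cons_self ..)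
    have ha : 0 < a.toNat := by omega
    have hi : 0 < i.toNat := by omega
    have hgcd := subgcd_eq i.toNat a.toNat hi ha
    have hcond : ((pfactors a.toNat).all (fun p => PySem.Int.mod i (p : Int) != 0) = true)
        ↔ Nat.gcd i.toNat a.toNat = 1 := by
      rw [coprime_iff_pfactors i.toNat a.toNat ha, List.all_eq_true]
      apply forall_congr'
      intro p
      apply imp_congr_right
      intro _
      rw [bne_iff_ne, ne_eq, PySem.Int.mod_eq_zero_iff_dvd, not_iff_not]
      constructor
      · intro hdvd
        have h' : (p : Int) ∣ (i.toNat : Int) := by rwa [Int.toNat_of_nonneg (by omega)]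
        exact_mod_cast h'
      · intro hdvd
        have h' : (p : Int) ∣ (i.toNat : Int) := Int.natCast_dvd_natCast.mpr hdvd
        rwa [Int.toNat_of_nonneg (by omega)] at h'
    simp only [fct1Go, fct1AltGo, hgcd]
    simp only [if_true]
    by_cases hg : Nat.gcd i.toNat a.toNat = 1
    · rw [if_pos (by exact_mod_cast hg), if_pos (hcond.mpr hg)]
    · rw [if_neg (by exact_mod_cast hg), if_neg (fun hc => hg (hcond.mp hc)),
        ih (fun j hj => hl j (List.mem_cons_of_mem _ hj))]

-- ===== VERDICT (by name: the statement is the Claim_ definition above) =====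
theorem fct1_spec : Claim_equal_fct1 := by
  intro a _
  unfold Spec_fct1 fct1 fct1_alt
  apply go_eq
  intro i hi
  have hmem := (PySem.List.mem_pyRange_one).mp hi
  omega
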